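-- pv_equiv track=rewrite | github.com/eliottcassidy2000/math | 03-artifacts/code/tournament_fast.py | is_doubly_regular
-- ===== SOURCE A (Python) =====
-- def is_doubly_regular(T):
--     """Check if tournament T is doubly regular (DRT).
--     Requires: (1) regular (all scores = (n-1)/2),
--     (2) for every pair (u,v), common out-neighbors = (n-3)/4.
--     Only possible when n = 3 mod 4."""
--     n = len(T)
--     if n % 2 == 0:
--         return False
--     k = (n - 1) // 2
--     # Check regularity
--     for v in range(n):
--         if sum(T[v]) != k:
--             return False
--     # Check doubly-regular
--     if (n - 3) % 4 != 0:
--         return False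
--     target = (n - 3) // 4
--     for u in range(n):
--         for v in range(u + 1, n):
--             common = sum(1 for w in range(n) if w != u and w != v
--                         and T[u][w] and T[v][w])
--             if common != target:
--                 return False
--     return True
-- ===== SOURCE B (Python) =====
-- def is_doubly_regular(T):
--     """Bitmask re-implementation: pack each row into an int once; each pair's
--     common out-neighbor count is a popcount of an AND, minus the u/v bits."""
--     n = len(T)
--     if n % 2 == 0:
--         return False
--     k = (n - 1) // 2
--     if any(sum(row) != k for row in T):
--         return False
--     if (n - 3) % 4 != 0:
--         return False
--     target = (n - 3) // 4
--     masks = []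
--     for row in T:
--         m = 0
--         for x in reversed(row):
--             m = 2 * m + (1 if x else 0)
--         masks.append(m)
--     for u in range(n):
--         mu = masks[u]
--         for v in range(u + 1, n):
--             c = mu & masks[v]
--             common = bin(c).count("1") - (c >> u & 1) - (c >> v & 1)
--             if common != target:
--                 return False
--     return True
-- ===== Notes on version B (the rewrite author's own statement) =====
-- stated objective: alternative
-- what changed: B packs each row once into an integer bitmask and obtains each pair's common out-neighbor count as a popcount of a single AND (minus the u- and v-bits), replacing A's per-pair scan over all w.
-- outside the precondition, e.g. on is_doubly_regular([[0, 1, 0], [1], [0, 1]]): A returns False, B returns False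
import Mathlib
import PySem

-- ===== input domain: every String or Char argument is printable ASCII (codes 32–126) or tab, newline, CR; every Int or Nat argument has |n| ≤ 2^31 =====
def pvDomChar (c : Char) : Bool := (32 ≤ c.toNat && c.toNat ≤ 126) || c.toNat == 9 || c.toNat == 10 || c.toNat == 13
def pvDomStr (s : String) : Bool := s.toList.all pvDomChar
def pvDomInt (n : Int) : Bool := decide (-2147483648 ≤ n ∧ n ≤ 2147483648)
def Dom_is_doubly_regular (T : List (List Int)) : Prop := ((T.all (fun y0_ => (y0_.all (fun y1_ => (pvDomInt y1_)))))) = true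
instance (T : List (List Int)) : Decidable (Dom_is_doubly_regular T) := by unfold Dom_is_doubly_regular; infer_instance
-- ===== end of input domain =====

-- B replaces A's per-pair inner scan over w by bitmask rows packed once and a
-- popcount of an AND per pair (minus the u and v bits): a different counting mechanism.

-- ===== PORT A =====
-- literal port of A: n even check, per-row score check, (n-3)%4 check, then
-- for each pair u < v count the w with w≠u, w≠v, T[u][w] and T[v][w] truthy
def is_doubly_regular (T : List (List Int)) : Bool :=
  let n := T.length
  if n % 2 = 0 then false
  else
    let k : Int := PySem.Int.floordiv ((n : Int) - 1) 2
    if (List.range n).all (fun v => (T.getD v []).sum == k) then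
      if PySem.Int.mod ((n : Int) - 3) 4 ≠ 0 then false
      else
        let target : Int := PySem.Int.floordiv ((n : Int) - 3) 4
        (List.range n).all (fun u =>
          (List.range' (u + 1) (n - (u + 1))).all (fun v =>
            let common : Int :=
              ((List.range n).countP (fun w =>
                decide (w ≠ u) && decide (w ≠ v) &&
                decide ((T.getD u []).getD w 0 ≠ 0) &&
                decide ((T.getD v []).getD w 0 ≠ 0)) : Int)
            common == target))
    else false

-- ===== PORT B =====
-- row packed into a bitmask integer, little-endian (bit w = row[w] truthy)
def pymask (row : List Int) : Nat :=
  row.foldr (fun x m => 2 * m + (if x ≠ 0 then 1 else 0)) 0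

-- bin(c).count("1"): popcount by repeated halving
def popcount (m : Nat) : Nat :=
  if m = 0 then 0 else m % 2 + popcount (m / 2)
decreasing_by exact Nat.div_lt_self (Nat.pos_of_ne_zero (by assumption)) (by omega)

def is_doubly_regular_alt (T : List (List Int)) : Bool :=
  let n := T.length
  if n % 2 = 0 then false
  else
    let k : Int := PySem.Int.floordiv ((n : Int) - 1) 2
    if T.any (fun row => row.sum != k) then false
    else if PySem.Int.mod ((n : Int) - 3) 4 ≠ 0 then false
    else
      let target : Int := PySem.Int.floordiv ((n : Int) - 3) 4
      let masks := T.map pymask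
      (List.range n).all (fun u =>
        let mu := masks.getD u 0
        (List.range' (u + 1) (n - (u + 1))).all (fun v =>
          let c := mu &&& masks.getD v 0
          let common : Int :=
            (popcount c : Int) - ((c >>> u) &&& 1 : Nat) - ((c >>> v) &&& 1 : Nat)
          common == target))

-- ===== PRECONDITION & SPEC =====
-- Pre_ excludes ragged inputs (some row shorter than n) that survive the scalar
-- checks, where A's pair loop may raise IndexError (and on a lucky short-circuit
-- accidentally returns); it keeps everything caught by the scalar checks and all
-- square matrices — the function's natural domain.
def Pre_is_doubly_regular (T : List (List Int)) : Prop :=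
  T.length % 2 = 0 ∨
  (∃ row ∈ T, row.sum ≠ PySem.Int.floordiv ((T.length : Int) - 1) 2) ∨
  PySem.Int.mod ((T.length : Int) - 3) 4 ≠ 0 ∨
  (∀ row ∈ T, row.length = T.length)
instance (T : List (List Int)) : Decidable (Pre_is_doubly_regular T) := by
  unfold Pre_is_doubly_regular; infer_instance

def pvWitness_is_doubly_regular : List (List Int) := [[0, 1, 0], [0, 0, 1], [1, 0, 0]]

def Spec_is_doubly_regular (T : List (List Int)) (out : Bool) : Prop := out = is_doubly_regular_alt T
instance (T : List (List Int)) (out : Bool) : Decidable (Spec_is_doubly_regular T out) := by unfold Spec_is_doubly_regular; infer_instance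

-- ===== CLAIM (what is proved, stated in full; the proofs are below) =====
def Claim_equal_is_doubly_regular : Prop := ∀ (T : List (List Int)), Dom_is_doubly_regular T → Pre_is_doubly_regular T → Spec_is_doubly_regular T (is_doubly_regular T)

-- ===== LEMMAS AND PROOFS =====

theorem all_congr_mem {α : Type} (l : List α) (f g : α → Bool)
    (h : ∀ x ∈ l, f x = g x) : l.all f = l.all g := by
  induction l with
  | nil => rfl
  | cons a t ih =>
    simp only [List.all_cons, h a (List.mem_cons_self), ih (fun x hx => h x (List.mem_cons_of_mem a hx))]

-- indexed regularity loop = loop over the rows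
theorem reg_loop_eq (T : List (List Int)) (k : Int) :
    (List.range T.length).all (fun v => (T.getD v []).sum == k)
      = T.all (fun row => row.sum == k) := by
  induction T with
  | nil => rfl
  | cons r t ih =>
    simp only [List.length_cons, List.range_succ_eq_map, List.all_cons, List.all_map]
    simp only [List.getD_cons_zero]
    exact congrArg (_ && ·) ih

theorem pymask_testBit (row : List Int) (w : Nat) :
    (pymask row).testBit w = ((row.getD w 0 : Int) ≠ 0 : Bool) := by
  induction row generalizing w with
  | nil => simp [pymask]
  | cons x xs ih =>
    have hrec : pymask (x :: xs) = 2 * pymask xs + (if x ≠ 0 then 1 else 0) := rfl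
    cases w with
    | zero =>
      simp only [hrec, Nat.testBit_zero, List.getD_cons_zero]
      rcases eq_or_ne x 0 with h | h <;> simp [h]
    | succ w =>
      have h2 : (2 * pymask xs + (if x ≠ 0 then 1 else 0)) / 2 = pymask xs := by
        rcases eq_or_ne x 0 with h | h <;> simp [h] <;> omega
      simp only [hrec, Nat.testBit_add_one, h2, List.getD_cons_succ]
      exact ih w

theorem pymask_lt (row : List Int) : pymask row < 2 ^ row.length := by
  induction row with
  | nil => simp [pymask]
  | cons x xs ih =>
    have hrec : pymask (x :: xs) = 2 * pymask xs + (if x ≠ 0 then 1 else 0) := rfl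
    rw [hrec]
    simp only [List.length_cons, pow_succ]
    rcases eq_or_ne x 0 with h | h <;> simp [h] <;> omega

theorem popcount_eq_countP (n : Nat) : ∀ (m : Nat), m < 2 ^ n →
    popcount m = (List.range n).countP (fun w => m.testBit w) := by
  induction n with
  | zero =>
    intro m hm
    interval_cases m
    simp [popcount]
  | succ n ih =>
    intro m hm
    by_cases h0 : m = 0
    · subst h0
      rw [popcount]
      simp [Nat.zero_testBit]
    · rw [popcount, if_neg h0]
      rw [List.range_succ_eq_map, List.countP_cons, List.countP_map]
      have hc : List.countP ((fun w => m.testBit w) ∘ Nat.succ) (List.range n)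
          = List.countP (fun w => (m / 2).testBit w) (List.range n) := by
        apply List.countP_congr; intro w _
        simp [Function.comp, Nat.succ_eq_add_one, Nat.testBit_add_one]
      rw [hc, ← ih (m / 2) (by omega)]
      have hb : m.testBit 0 = decide (m % 2 = 1) := by
        simp [Nat.testBit_zero]
      rw [hb]
      rcases Nat.mod_two_eq_zero_or_one m with h | h <;> simp [h] <;> omega

-- (c >>> w) &&& 1 as a testBit
theorem shift_and_one (c w : Nat) : (c >>> w) &&& 1 = if c.testBit w then 1 else 0 := by
  rw [Nat.and_one_is_mod]
  rcases h : c.testBit w <;>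
    simp only [Nat.testBit, Nat.one_and_eq_mod_two, bne_iff_ne, ne_eq] at h <;>
    rcases Nat.mod_two_eq_zero_or_one (c >>> w) with h2 | h2 <;> simp_all

-- removing two distinct in-range indices from a count over a nodup list
theorem countP_exclude_two {l : List Nat} (hnd : l.Nodup) (u v : Nat)
    (hu : u ∈ l) (hv : v ∈ l) (huv : u ≠ v) (q : Nat → Bool) :
    l.countP q = l.countP (fun w => decide (w ≠ u) && decide (w ≠ v) && q w)
      + (if q u then 1 else 0) + (if q v then 1 else 0) := by
  have hsplit := List.countP_eq_countP_filter_add l q (fun w => decide (w ≠ u) && decide (w ≠ v))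
  have h1 : (l.filter (fun w => decide (w ≠ u) && decide (w ≠ v))).countP q
      = l.countP (fun w => decide (w ≠ u) && decide (w ≠ v) && q w) := by
    rw [List.countP_filter]
    apply List.countP_congr; intro w _
    by_cases h1 : w = u <;> by_cases h2 : w = v <;> simp [h1, h2]
  have hperm : List.Perm (l.filter (fun w => !(decide (w ≠ u) && decide (w ≠ v)))) [u, v] := by
    rw [List.perm_ext_iff_of_nodup (hnd.filter _) (by simp [huv])]
    intro a
    simp only [List.mem_filter, List.mem_cons, List.not_mem_nil, or_false]
    constructor
    · rintro ⟨_, h⟩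
      by_cases h1 : a = u <;> by_cases h2 : a = v <;> simp_all
    · rintro (rfl | rfl) <;> simp [hu, hv]
  have h2 := hperm.countP_eq q
  simp only [List.countP_cons, List.countP_nil] at h2
  rw [hsplit, h1, h2]
  cases hq : q u <;> cases hqv : q v <;> simp

-- the per-pair counts agree on a square matrix
theorem pair_count_eq (T : List (List Int)) (n u v : Nat)
    (hsq : ∀ row ∈ T, row.length = T.length) (hn : n = T.length)
    (hu : u < n) (hv : v < n) (huv : u ≠ v) :
    (((List.range n).countP (fun w =>
        decide (w ≠ u) && decide (w ≠ v) &&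
        decide ((T.getD u []).getD w 0 ≠ 0) &&
        decide ((T.getD v []).getD w 0 ≠ 0)) : Int))
      = (popcount (((T.map pymask).getD u 0 &&& (T.map pymask).getD v 0)) : Int)
        - ((((T.map pymask).getD u 0 &&& (T.map pymask).getD v 0) >>> u) &&& 1 : Nat)
        - ((((T.map pymask).getD u 0 &&& (T.map pymask).getD v 0) >>> v) &&& 1 : Nat) := by
  have hmask : ∀ i, i < n → (T.map pymask).getD i 0 = pymask (T.getD i []) := by
    intro i hi
    rw [List.getD_eq_getElem?_getD, List.getElem?_map, List.getD_eq_getElem?_getD,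
      List.getElem?_eq_getElem (by omega : i < T.length)]
    simp
  have hlen : ∀ i, i < n → (T.getD i []).length = n := by
    intro i hi
    rw [hn]
    apply hsq
    rw [List.getD_eq_getElem?_getD, List.getElem?_eq_getElem (by omega : i < T.length)]
    exact List.getElem_mem _
  set tu := T.getD u [] with htu
  set tv := T.getD v [] with htv
  set c := ((T.map pymask).getD u 0 &&& (T.map pymask).getD v 0) with hc
  have hcc : c = pymask tu &&& pymask tv := by rw [hc, hmask u hu, hmask v hv]
  have hbit : ∀ w, c.testBit w = (decide ((tu.getD w 0 : Int) ≠ 0) && decide ((tv.getD w 0 : Int) ≠ 0)) := by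
    intro w
    rw [hcc, Nat.testBit_and, pymask_testBit, pymask_testBit]
  have hclt : c < 2 ^ n := by
    calc c ≤ pymask tu := by rw [hcc]; exact Nat.and_le_left
    _ < 2 ^ tu.length := pymask_lt tu
    _ = 2 ^ n := by rw [hlen u hu]
  have hpop : popcount c = (List.range n).countP (fun w => c.testBit w) :=
    popcount_eq_countP n c hclt
  have hexcl := countP_exclude_two (List.nodup_range) u v
    (List.mem_range.mpr hu) (List.mem_range.mpr hv) huv (fun w => c.testBit w)
  have hLHS : (List.range n).countP (fun w =>
        decide (w ≠ u) && decide (w ≠ v) &&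
        decide ((tu.getD w 0 : Int) ≠ 0) && decide ((tv.getD w 0 : Int) ≠ 0))
      = (List.range n).countP (fun w => decide (w ≠ u) && decide (w ≠ v) && c.testBit w) := by
    apply List.countP_congr
    intro w _
    rw [hbit w]
    cases decide (w ≠ u) <;> cases decide (w ≠ v) <;>
      cases hx : decide ((tu.getD w 0 : Int) ≠ 0) <;> simp
  rw [shift_and_one, shift_and_one, hpop, hLHS]
  rw [hexcl]
  cases hqu : c.testBit u <;> cases hqv : c.testBit v <;> push_cast <;> simp

-- ===== VERDICT (by name: the statement is the Claim_ definition above) =====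
theorem is_doubly_regular_spec : Claim_equal_is_doubly_regular := by
  intro T _ hpre
  unfold Spec_is_doubly_regular
  unfold is_doubly_regular is_doubly_regular_alt
  simp only []
  by_cases h2 : T.length % 2 = 0
  · simp [h2]
  · rw [if_neg h2, if_neg h2]
    rw [reg_loop_eq]
    have hany : T.any (fun row => row.sum != PySem.Int.floordiv ((T.length : Int) - 1) 2)
        = !(T.all (fun row => row.sum == PySem.Int.floordiv ((T.length : Int) - 1) 2)) := by
      rw [List.all_eq_not_any_not]
      simp [bne]
    rw [hany]
    by_cases hall : T.all (fun row => row.sum == PySem.Int.floordiv ((T.length : Int) - 1) 2)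
    · rw [hall]
      simp only [Bool.not_true, Bool.false_eq_true, if_false, if_true]
      by_cases hmod : PySem.Int.mod ((T.length : Int) - 3) 4 ≠ 0
      · rw [if_pos hmod, if_pos hmod]
      · rw [if_neg hmod, if_neg hmod]
        have hsq : ∀ row ∈ T, row.length = T.length := by
          rcases hpre with h | h | h | h
          · exact absurd h h2
          · exfalso
            obtain ⟨row, hrow, hne⟩ := h
            have := List.all_eq_true.mp hall row hrow
            exact hne (by simpa using this)
          · exact absurd h hmod
          · exact h
        apply all_congr_mem
        intro u hu
        apply all_congr_mem
        intro v hv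
        have hu' : u < T.length := List.mem_range.mp hu
        have hv' : u + 1 ≤ v ∧ v < T.length := by
          have := List.mem_range'_1.mp hv
          omega
        rw [pair_count_eq T T.length u v hsq rfl hu' hv'.2 (by omega)]
    · have hallf : T.all (fun row => row.sum == PySem.Int.floordiv ((T.length : Int) - 1) 2) = false := by
        simpa using hall
      rw [hallf]
      simp
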